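-- pv_equiv track=rewrite | github.com/ecaterinacatargiu/FP | Assignment2/A2/complexnumbers.py | sameModulussequence
-- ===== SOURCE A (Python) =====
-- def getReal(c):
--     #return cn[0]
--     return c["Real"]
--
-- def getIm(c):
--     #return cn[1]
--     return c["Im"]
--
-- def getModulus(cn):
--     """A function that return the moduus of a complex number.
--    Input: a list that denote a complex number
--    Output: the modulus of the complex number"""
--     mod=int(((getReal(cn)*getReal(cn))+(getIm(cn)*getIm(cn)))**(1/2))
--     return mod
--
-- def sameModulussequence(cn):
--     """A function that returns the longest sequence of complex numbers that have the same modulus.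
--     Input: a list of lists
--     Output: the longest sequence of complex numbers that have the same modulus"""
--     sequence=[]
--     maxSequence=[]
--     i=1
--     sequence.append(cn[0])
--     while i<len(cn):
--         if getModulus(cn[i])==getModulus(cn[i-1]):
--             sequence.append(cn[i])
--         else:
--             if len(sequence)>len(maxSequence):
--                 maxSequence=[]
--                 maxSequence=sequence
--             sequence=[]
--             sequence.append(cn[i])
--         i+=1
--     if len(sequence)>len(maxSequence):
--         maxSequence=[]
--         maxSequence=sequence
--     return maxSequence
-- ===== SOURCE B (Python) =====
-- # B: index-based re-implementation — compute the cut positions where the truncated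
-- # modulus changes, pick the best (start, end) index pair by arithmetic on cut indices
-- # (strict > keeps the earliest longest), and return a single slice of cn; no run lists
-- # are ever materialized. Same return value as A wherever A returns; A raises IndexError
-- # on [] where B returns [].
--
-- def getReal(c):
--     return c["Real"]
--
-- def getIm(c):
--     return c["Im"]
--
-- def getModulus(cn):
--     mod = int(((getReal(cn) * getReal(cn)) + (getIm(cn) * getIm(cn))) ** (1 / 2))
--     return mod
--
-- def sameModulussequence(cn):
--     n = len(cn)
--     cuts = [0] + [i for i in range(1, n) if getModulus(cn[i]) != getModulus(cn[i - 1])] + [n]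
--     s, e = 0, 0
--     for a, b in zip(cuts, cuts[1:]):
--         if b - a > e - s:
--             s, e = a, b
--     return cn[s:e]
-- ===== Notes on version B (the rewrite author's own statement) =====
-- stated objective: alternative
-- what changed: A accumulates the current run and the best run as lists inside one while-loop; B never builds any run list: it computes the integer cut positions where the modulus changes, picks the best (start,end) index pair by arithmetic over consecutive cuts, and returns one slice of cn.
import Mathlib
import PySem

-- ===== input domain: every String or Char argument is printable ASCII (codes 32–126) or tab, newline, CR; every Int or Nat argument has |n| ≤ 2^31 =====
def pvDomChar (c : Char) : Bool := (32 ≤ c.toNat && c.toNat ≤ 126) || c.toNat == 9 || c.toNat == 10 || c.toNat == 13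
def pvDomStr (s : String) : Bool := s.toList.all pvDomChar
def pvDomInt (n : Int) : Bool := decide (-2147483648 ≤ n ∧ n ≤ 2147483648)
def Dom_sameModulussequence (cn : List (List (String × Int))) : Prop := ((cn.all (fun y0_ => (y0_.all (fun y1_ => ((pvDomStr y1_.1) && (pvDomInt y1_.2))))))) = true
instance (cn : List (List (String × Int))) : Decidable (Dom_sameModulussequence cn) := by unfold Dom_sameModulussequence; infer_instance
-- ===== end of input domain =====

-- B replaces A's run-list accumulators by index arithmetic: it computes the cut positions
-- where the modulus changes, picks the best (start,end) pair of consecutive cuts, and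
-- returns one slice of cn; same return value on Pre_, not faster.


-- ===== PORT A =====
-- getModulus / getReal / getIm: c["Real"], c["Im"] are PySem.Dict lookups (none = KeyError);
-- int(x ** (1/2)) is modelled by Float.sqrt on the exactly-converted Int, floored and
-- truncated (checked against CPython on the |n| ≤ 2^31 domain).
def pyGetModulus? (c : List (String × Int)) : Option Int :=
  match (PySem.Dict.mk c).get? "Real", (PySem.Dict.mk c).get? "Im" with
  | some r, some i =>
      some (Int.ofNat (Float.toUInt64 (Float.sqrt (Float.ofInt (r * r + i * i))).floor).toNat)
  | _, _ => none

-- A's while-loop, step for step: prev = cn[i-1], rest = cn[i:], same two list accumulators.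
def sameModulussequenceLoop (prev : List (String × Int)) (rest : List (List (String × Int)))
    (sequence maxSequence : List (List (String × Int))) : List (List (String × Int)) :=
  match rest with
  | [] => if sequence.length > maxSequence.length then sequence else maxSequence
  | c :: rest' =>
      if pyGetModulus? c = pyGetModulus? prev then
        sameModulussequenceLoop c rest' (sequence ++ [c]) maxSequence
      else
        sameModulussequenceLoop c rest' [c]
          (if sequence.length > maxSequence.length then sequence else maxSequence)

def sameModulussequence (cn : List (List (String × Int))) : List (List (String × Int)) :=
  match cn with
  | [] => []   -- Python raises IndexError here (cn[0]); excluded by Pre_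
  | c0 :: rest => sameModulussequenceLoop c0 rest [c0] []

-- ===== PORT B =====
-- the comprehension's condition: getModulus(cn[i]) != getModulus(cn[i-1])
def isCut (cn : List (List (String × Int))) (i : Int) : Bool :=
  decide ((PySem.List.pyGet? cn i).map pyGetModulus? ≠ (PySem.List.pyGet? cn (i - 1)).map pyGetModulus?)

-- loop body of 'for a, b in zip(cuts, cuts[1:])'
def cutStep (se : Int × Int) (ab : Int × Int) : Int × Int :=
  if ab.2 - ab.1 > se.2 - se.1 then ab else se

def sameModulussequence_alt (cn : List (List (String × Int))) : List (List (String × Int)) :=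
  let n : Int := (cn.length : Int)
  let cuts := [(0 : Int)] ++ (PySem.List.pyRange 1 n 1).filter (isCut cn) ++ [n]
  let best := (cuts.zip cuts.tail).foldl cutStep ((0 : Int), (0 : Int))
  PySem.List.slice cn (some best.1) (some best.2)

-- ===== PRECONDITION & SPEC =====
-- Pre_ is exactly where the Python A returns: it excludes the empty list (A raises
-- IndexError at cn[0]) and lists of length ≥ 2 containing a number without a "Real" or
-- "Im" key (getModulus raises KeyError there, in A and in B alike; a single-element list
-- never has a modulus computed).
def Pre_sameModulussequence (cn : List (List (String × Int))) : Prop :=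
  cn ≠ [] ∧ (2 ≤ cn.length → ∀ c ∈ cn,
    (PySem.Dict.mk c).contains "Real" = true ∧ (PySem.Dict.mk c).contains "Im" = true)
instance (cn : List (List (String × Int))) : Decidable (Pre_sameModulussequence cn) := by
  unfold Pre_sameModulussequence; infer_instance
def pvWitness_sameModulussequence : (List (List (String × Int))) :=
  ([[("Real", 3), ("Im", 4)], [("Real", 5), ("Im", 0)], [("Real", 0), ("Im", 2)]])

def Spec_sameModulussequence (cn : List (List (String × Int))) (out : List (List (String × Int))) : Prop := out = sameModulussequence_alt cn
instance (cn : List (List (String × Int))) (out : List (List (String × Int))) : Decidable (Spec_sameModulussequence cn out) := by unfold Spec_sameModulussequence; infer_instance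

-- ===== CLAIM (what is proved, stated in full; the proofs are below) =====
def Claim_equal_sameModulussequence : Prop := ∀ (cn : List (List (String × Int))), Dom_sameModulussequence cn → Pre_sameModulussequence cn → Spec_sameModulussequence cn (sameModulussequence cn)

-- ===== LEMMAS AND PROOFS =====

-- fold over zip (a :: L) L, written as a structural recursion on L
def pairFold (a : Int) (L : List Int) (se : Int × Int) : Int × Int :=
  match L with
  | [] => se
  | b :: L' => pairFold b L' (cutStep se (a, b))

theorem zip_foldl_eq_pairFold (L : List Int) : ∀ (a : Int) (se : Int × Int),
    (((a :: L).zip L).foldl cutStep se) = pairFold a L se := by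
  induction L with
  | nil => intro a se; rfl
  | cons b L' ih => intro a se; simpa [pairFold] using ih b (cutStep se (a, b))

-- slice cn s j ++ [cn[j]] = slice cn s (j+1)
theorem slice_snoc (cn : List (List (String × Int))) (s j : Nat) (hsj : s ≤ j)
    (hj : j < cn.length) :
    PySem.List.slice cn (some (s : Int)) (some (j : Int)) ++ [cn[j]] =
      PySem.List.slice cn (some (s : Int)) (some ((j + 1 : Nat) : Int)) := by
  rw [PySem.List.slice_natCast, PySem.List.slice_natCast]
  have h1 : j + 1 - s = (j - s) + 1 := by omega
  rw [h1, List.take_add_one]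
  have h2 : (cn.drop s)[j - s]? = some cn[j] := by
    rw [List.getElem?_drop]
    have : s + (j - s) = j := by omega
    rw [this, List.getElem?_eq_getElem hj]
  simp [h2]

theorem length_slice_nat (cn : List (List (String × Int))) (a b : Nat)
    (hb : b ≤ cn.length) :
    (PySem.List.slice cn (some (a : Int)) (some (b : Int))).length = b - a := by
  rw [PySem.List.slice_natCast]
  simp
  omega

-- main invariant: A's loop at position j (prev = cn[j-1], rest = cn[j:]) with the current
-- run = cn[s:j] (no cut strictly inside) and best run = cn[bs:be] equals B's index fold.
theorem loop_eq_pairFold (cn : List (List (String × Int))) :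
    ∀ (rest : List (List (String × Int))) (j s bs be : Nat) (prev : List (String × Int)),
      rest = cn.drop j → cn[j - 1]? = some prev → 1 ≤ j → j ≤ cn.length → s < j →
      (∀ i : Nat, s < i → i < j → isCut cn (i : Int) = false) →
      bs ≤ be → be ≤ cn.length →
      sameModulussequenceLoop prev rest
          (PySem.List.slice cn (some (s : Int)) (some (j : Int)))
          (PySem.List.slice cn (some (bs : Int)) (some (be : Int))) =
        (fun se => PySem.List.slice cn (some se.1) (some se.2))
          (pairFold (s : Int)
            ((PySem.List.pyRange (j : Int) (cn.length : Int) 1).filter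
                (isCut cn) ++ [(cn.length : Int)])
            ((bs : Int), (be : Int))) := by
  intro rest
  induction rest with
  | nil =>
      intro j s bs be prev hdrop hprev hj hjn hsj hnocut hbsbe hben
      have hjeq : j = cn.length := by
        have := congrArg List.length hdrop
        simp [List.length_drop] at this
        omega
      subst hjeq
      rw [PySem.List.pyRange_one_eq_nil (by omega)]
      simp only [List.filter_nil, List.nil_append, pairFold, sameModulussequenceLoop]
      rw [length_slice_nat cn s cn.length (le_refl _), length_slice_nat cn bs be hben]
      by_cases hc : ((cn.length : Int) - (s : Int) > (be : Int) - (bs : Int))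
      · have : cn.length - s > be - bs := by omega
        simp [cutStep, hc, this]
      · have : ¬ (cn.length - s > be - bs) := by omega
        simp [cutStep, hc, this]
  | cons c rest' ih =>
      intro j s bs be prev hdrop hprev hj hjn hsj hnocut hbsbe hben
      have hjlt : j < cn.length := by
        by_contra h
        rw [List.drop_eq_nil_of_le (by omega)] at hdrop
        exact List.cons_ne_nil _ _ hdrop
      have hc : cn[j]? = some c := by
        have h0 : (cn.drop j)[0]? = some c := by rw [← hdrop]; rfl
        rwa [List.getElem?_drop, Nat.add_zero] at h0
      have hdrop' : rest' = cn.drop (j + 1) := by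
        have h1 := congrArg (List.drop 1) hdrop
        simpa [List.drop_drop, Nat.add_comm] using h1
      have hcv : cn[j] = c := by
        have := List.getElem?_eq_getElem hjlt
        rw [hc] at this; exact (Option.some.injEq _ _).mp this.symm
      have hprevv : cn[j - 1]'(by omega) = prev := by
        have := List.getElem?_eq_getElem (show j - 1 < cn.length by omega)
        rw [hprev] at this; exact (Option.some.injEq _ _).mp this.symm
      have hcut_eval : isCut cn (j : Int) =
          decide (pyGetModulus? c ≠ pyGetModulus? prev) := by
        unfold isCut
        have hj1 : ((j : Int) - 1) = ((j - 1 : Nat) : Int) := by omega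
        rw [hj1]
        rw [PySem.List.pyGet?_natCast, PySem.List.pyGet?_natCast]
        rw [hc, hprev]
        simp
      have hrange : PySem.List.pyRange (j : Int) (cn.length : Int) 1 =
          (j : Int) :: PySem.List.pyRange ((j : Int) + 1) (cn.length : Int) 1 :=
        PySem.List.pyRange_one_cons (by omega)
      have hcast : ((j : Int) + 1) = ((j + 1 : Nat) : Int) := by omega
      by_cases heq : pyGetModulus? c = pyGetModulus? prev
      · -- same modulus: extend the current run
        have hcutF : isCut cn (j : Int) = false := by
          rw [hcut_eval]; simp [heq]
        have lhs : sameModulussequenceLoop prev (c :: rest')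
            (PySem.List.slice cn (some (s : Int)) (some (j : Int)))
            (PySem.List.slice cn (some (bs : Int)) (some (be : Int))) =
            sameModulussequenceLoop c rest'
              (PySem.List.slice cn (some (s : Int)) (some (j : Int)) ++ [c])
              (PySem.List.slice cn (some (bs : Int)) (some (be : Int))) := by
          simp [sameModulussequenceLoop, heq]
        have hsnoc := slice_snoc cn s j (by omega) hjlt
        rw [hcv] at hsnoc
        have hfilt : (PySem.List.pyRange (j : Int) (cn.length : Int) 1).filter
            (isCut cn) =
            (PySem.List.pyRange ((j + 1 : Nat) : Int) (cn.length : Int) 1).filter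
              (isCut cn) := by
          rw [hrange, ← hcast]; simp [hcutF]
        rw [lhs, hsnoc, hfilt]
        simpa using ih (j + 1) s bs be c hdrop' (by simpa using hc) (by omega) (by omega)
          (by omega)
          (by
            intro i h1 h2
            by_cases hij : i = j
            · subst hij; exact hcutF
            · exact hnocut i h1 (by omega))
          hbsbe hben
      · -- modulus changed: close the run at cut j
        have hcutT : isCut cn (j : Int) = true := by
          rw [hcut_eval]; simp [heq]
        have lhs : sameModulussequenceLoop prev (c :: rest')
            (PySem.List.slice cn (some (s : Int)) (some (j : Int)))
            (PySem.List.slice cn (some (bs : Int)) (some (be : Int))) =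
            sameModulussequenceLoop c rest' [c]
              (if (PySem.List.slice cn (some (s : Int)) (some (j : Int))).length >
                  (PySem.List.slice cn (some (bs : Int)) (some (be : Int))).length then
                 PySem.List.slice cn (some (s : Int)) (some (j : Int))
               else PySem.List.slice cn (some (bs : Int)) (some (be : Int))) := by
          simp [sameModulussequenceLoop, heq]
        have hsingle : [c] = PySem.List.slice cn (some (j : Int)) (some ((j + 1 : Nat) : Int)) := by
          have := slice_snoc cn j j (le_refl _) hjlt
          rw [hcv] at this
          rw [← this, PySem.List.slice_natCast]
          simp
        have hfilt : (PySem.List.pyRange (j : Int) (cn.length : Int) 1).filter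
            (isCut cn) =
            (j : Int) :: (PySem.List.pyRange ((j + 1 : Nat) : Int) (cn.length : Int) 1).filter
              (isCut cn) := by
          rw [hrange, ← hcast]; simp [hcutT]
        rw [lhs, hsingle, hfilt]
        simp only [List.cons_append, pairFold]
        rw [length_slice_nat cn s j (by omega), length_slice_nat cn bs be hben]
        have hstep : cutStep ((bs : Int), (be : Int)) ((s : Int), (j : Int)) =
            if (j : Int) - (s : Int) > (be : Int) - (bs : Int) then ((s : Int), (j : Int))
            else ((bs : Int), (be : Int)) := by
          simp [cutStep]
        rw [hstep]
        by_cases hcond : ((j : Int) - (s : Int) > (be : Int) - (bs : Int))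
        · have hn : j - s > be - bs := by omega
          rw [if_pos hcond, if_pos hn]
          simpa using ih (j + 1) j s j c hdrop' (by simpa using hc) (by omega) (by omega)
            (by omega) (by intro i h1 h2; omega) (by omega) (by omega)
        · have hn : ¬ (j - s > be - bs) := by omega
          rw [if_neg hcond, if_neg hn]
          simpa using ih (j + 1) j bs be c hdrop' (by simpa using hc) (by omega) (by omega)
            (by omega) (by intro i h1 h2; omega) hbsbe hben

-- ===== VERDICT (by name: the statements are the Claim_ definitions above) =====
theorem sameModulussequence_spec : Claim_equal_sameModulussequence := by
  intro cn _ hpre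
  unfold Spec_sameModulussequence
  obtain ⟨hne, -⟩ := hpre
  match cn, hne with
  | c0 :: rest, _ =>
      unfold sameModulussequence sameModulussequence_alt
      simp only [List.cons_append, List.nil_append, List.tail_cons]
      rw [zip_foldl_eq_pairFold]
      have h := loop_eq_pairFold (c0 :: rest) rest 1 0 0 0 c0 rfl rfl (le_refl _)
        (by simp) (by omega) (by intro i h1 h2; omega) (le_refl _) (by simp)
      simpa [PySem.List.slice_natCast] using h
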